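-- pv_equiv track=rewrite | github.com/theAfricanQuant/lazynlp | lazynlp/cleaner.py | connect_lines
-- ===== SOURCE A (Python) =====
-- def connect_lines(txt, line_sep='\n'):
--     """ This happens when you crawl text from a webpage and
--     they have random breaking lines mid-sentence.
--
--     This function is to connect those lines.
--
--     Two consecutive lines are separated by line_sep.
--     """
--     lines = txt.split('\n')
--
--     result, curr = '', ''
--     for line in lines:
--         if line := line.strip():
--             curr += f'{line} '
--
--         else:
--             if curr:
--                 result += (curr + '\n')
--             result += line_sep
--             curr = ''
--     return result + curr
-- ===== SOURCE B (Python) =====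
-- def connect_lines(txt, line_sep='\n'):
--     """Group consecutive blank / non-blank stripped lines, then render each
--     run in one pass: paragraphs joined with trailing spaces (plus '\n' unless
--     last group), blank runs as line_sep repeated."""
--     lines = [l.strip() for l in txt.split('\n')]
--     groups = []
--     i = 0
--     while i < len(lines):
--         key = bool(lines[i])
--         j = i + 1
--         while j < len(lines) and bool(lines[j]) == key:
--             j += 1
--         groups.append(lines[i:j])
--         i = j
--     out = []
--     for k, g in enumerate(groups):
--         if g[0]:
--             out.append(''.join(l + ' ' for l in g))
--             if k != len(groups) - 1:
--                 out.append('\n')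
--         else:
--             out.append(line_sep * len(g))
--     return ''.join(out)
-- ===== Notes on version B (the rewrite author's own statement) =====
-- stated objective: alternative
-- what changed: Replaces A's per-line accumulate-and-flush state machine (result/curr mutable state) with a two-phase pass: first group consecutive blank/non-blank stripped lines into maximal runs, then render each run independently (paragraph join + '\n' unless last group; line_sep repeated for blank runs).
import Mathlib
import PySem

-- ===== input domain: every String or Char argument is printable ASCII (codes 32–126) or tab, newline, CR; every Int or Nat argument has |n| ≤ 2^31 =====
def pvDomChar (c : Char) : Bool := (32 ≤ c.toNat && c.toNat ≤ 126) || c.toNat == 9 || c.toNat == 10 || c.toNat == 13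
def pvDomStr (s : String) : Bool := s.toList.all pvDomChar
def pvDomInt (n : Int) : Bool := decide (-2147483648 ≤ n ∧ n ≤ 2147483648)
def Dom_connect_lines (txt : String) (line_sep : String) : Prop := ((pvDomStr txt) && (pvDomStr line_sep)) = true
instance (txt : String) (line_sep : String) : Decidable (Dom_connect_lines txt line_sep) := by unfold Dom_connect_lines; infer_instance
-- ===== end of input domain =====

-- B replaces A's per-line accumulate-and-flush state machine with two phases (group maximal
-- blank/non-blank runs, then render each group); alternative decomposition, same cost.


-- ===== PORT A =====
-- the loop body: state (result, curr), one raw line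
def stepA (line_sep : String) (st : String × String) (line : String) : String × String :=
  let line := PySem.Str.strip line
  if line ≠ "" then (st.1, st.2 ++ line ++ " ")
  else ((if st.2 ≠ "" then st.1 ++ st.2 ++ "\n" else st.1) ++ line_sep, "")

def connect_lines (txt : String) (line_sep : String) : String :=
  let lines := (PySem.Str.split? txt "\n").getD []
  let st := lines.foldl (stepA line_sep) ("", "")
  st.1 ++ st.2

-- ===== PORT B =====
-- maximal runs of consecutive lines with the same blank/non-blank key
def groupsB : List String → List (List String)
  | [] => []
  | l :: ls =>
    let p := fun x => (decide (x ≠ "")) == (decide (l ≠ ""))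
    (l :: ls.takeWhile p) :: groupsB (ls.dropWhile p)
termination_by ls => ls.length
decreasing_by simpa using Nat.lt_succ_of_le (List.length_dropWhile_le _ _)

-- ''.join(l + ' ' for l in g)
def joinG : List String → String
  | [] => ""
  | l :: ls => l ++ " " ++ joinG ls

-- line_sep * n
def repSep (sep : String) : Nat → String
  | 0 => ""
  | n + 1 => sep ++ repSep sep n

def renderB (sep : String) : List (List String) → String
  | [] => ""
  | g :: gs =>
    (if g.headD "" ≠ "" then joinG g ++ (if gs.isEmpty then "" else "\n")
     else repSep sep g.length) ++ renderB sep gs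

def connect_lines_alt (txt : String) (line_sep : String) : String :=
  renderB line_sep (groupsB (((PySem.Str.split? txt "\n").getD []).map PySem.Str.strip))

-- ===== PRECONDITION & SPEC =====
def Spec_connect_lines (txt : String) (line_sep : String) (out : String) : Prop := out = connect_lines_alt txt line_sep
instance (txt : String) (line_sep : String) (out : String) : Decidable (Spec_connect_lines txt line_sep out) := by unfold Spec_connect_lines; infer_instance

-- ===== CLAIM (what is proved, stated in full; the proofs are below) =====
def Claim_equal_connect_lines : Prop := ∀ (txt : String) (line_sep : String), Dom_connect_lines txt line_sep → Spec_connect_lines txt line_sep (connect_lines txt line_sep)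

-- ===== LEMMAS AND PROOFS =====

-- A's loop body on already-stripped lines (strip is applied by the map in B's pipeline)
def stepA' (line_sep : String) (st : String × String) (line : String) : String × String :=
  if line ≠ "" then (st.1, st.2 ++ line ++ " ")
  else ((if st.2 ≠ "" then st.1 ++ st.2 ++ "\n" else st.1) ++ line_sep, "")

def FA (sep : String) (st : String × String) (ls : List String) : String :=
  let st := ls.foldl (stepA' sep) st
  st.1 ++ st.2

theorem stepA'_blank (sep : String) (st : String × String) :
    stepA' sep st "" = ((if st.2 ≠ "" then st.1 ++ st.2 ++ "\n" else st.1) ++ sep, "") := by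
  simp [stepA']

theorem stepA'_nonblank (sep : String) (st : String × String) (l : String) (h : ¬ l = "") :
    stepA' sep st l = (st.1, st.2 ++ l ++ " ") := by
  simp [stepA', h]

theorem FA_prefix (sep : String) (ls : List String) : ∀ res curr,
    FA sep (res, curr) ls = res ++ FA sep ("", curr) ls := by
  induction ls with
  | nil => intro res curr; simp [FA]
  | cons l ls ih =>
    intro res curr
    by_cases h : l = ""
    · subst h
      simp only [FA, List.foldl_cons, stepA'_blank]
      have h1 := ih ((if curr ≠ "" then res ++ curr ++ "\n" else res) ++ sep) ""
      have h2 := ih ((if curr ≠ "" then "" ++ curr ++ "\n" else "") ++ sep) ""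
      simp only [FA] at h1 h2 ⊢
      rw [h1, h2]
      split_ifs <;> simp [String.append_assoc, String.empty_append]
    · simp only [FA, List.foldl_cons, stepA'_nonblank sep _ l h]
      have h1 := ih res (curr ++ l ++ " ")
      have h2 := ih "" (curr ++ l ++ " ")
      simp only [FA] at h1 h2 ⊢
      rw [h1, h2, String.empty_append]

theorem joinG_ne_empty (l : String) (g : List String) : joinG (l :: g) ≠ "" := by
  intro h
  have hlen : (joinG (l :: g)).length = 0 := by rw [h]; rfl
  have hsp : (" " : String).length = 1 := rfl
  simp only [joinG, String.length_append] at hlen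
  omega

theorem FA_nonblank_run (sep : String) (g : List String) : ∀ ls curr, (∀ x ∈ g, x ≠ "") →
    FA sep ("", curr) (g ++ ls) = FA sep ("", curr ++ joinG g) ls := by
  induction g with
  | nil => intro ls curr _; simp [joinG, String.append_empty]
  | cons l g ih =>
    intro ls curr hall
    have hl : ¬ l = "" := hall l (by simp)
    simp only [List.cons_append, FA, List.foldl_cons, stepA'_nonblank sep _ l hl]
    have h1 := ih ls (curr ++ l ++ " ") (fun x hx => hall x (by simp [hx]))
    simp only [FA] at h1 ⊢
    rw [h1]
    simp [joinG, String.append_assoc]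

theorem FA_blank_run (sep : String) (g : List String) : ∀ ls, (∀ x ∈ g, x = "") →
    FA sep ("", "") (g ++ ls) = repSep sep g.length ++ FA sep ("", "") ls := by
  induction g with
  | nil => intro ls _; simp [repSep, String.empty_append]
  | cons l g ih =>
    intro ls hall
    have hl : l = "" := hall l (by simp)
    subst hl
    simp only [List.cons_append, FA, List.foldl_cons, stepA'_blank]
    have hif : ((if ("" : String) ≠ "" then "" ++ "" ++ "\n" else "") ++ sep) = sep := by simp
    rw [hif]
    have h1 := FA_prefix sep (g ++ ls) sep ""
    have h2 := ih ls (fun x hx => hall x (by simp [hx]))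
    simp only [FA] at h1 h2 ⊢
    rw [h1, h2]
    simp only [repSep, List.length_cons]
    rw [String.append_assoc]

theorem FA_flush (sep : String) (curr : String) (hc : curr ≠ "") (ls : List String) :
    FA sep ("", curr) ("" :: ls) = curr ++ "\n" ++ FA sep ("", "") ("" :: ls) := by
  simp only [FA, List.foldl_cons, stepA'_blank]
  have hif1 : ((if curr ≠ "" then "" ++ curr ++ "\n" else "") ++ sep) = curr ++ "\n" ++ sep := by
    simp [hc, String.empty_append, String.append_assoc]
  have hif2 : ((if ("" : String) ≠ "" then "" ++ "" ++ "\n" else "") ++ sep) = sep := by simp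
  rw [hif1, hif2]
  have h1 := FA_prefix sep ls (curr ++ "\n" ++ sep) ""
  have h2 := FA_prefix sep ls sep ""
  simp only [FA] at h1 h2 ⊢
  rw [h1, h2]
  simp [String.append_assoc]

theorem FA_eq_render (sep : String) (ls : List String) :
    FA sep ("", "") ls = renderB sep (groupsB ls) := by
  induction ls using groupsB.induct with
  | case1 => simp [FA, renderB, groupsB]
  | case2 l ls p ih =>
    have hsplit : l :: ls = (l :: ls.takeWhile p) ++ ls.dropWhile p := by
      simp [List.takeWhile_append_dropWhile]
    have hgroups : groupsB (l :: ls) = (l :: ls.takeWhile p) :: groupsB (ls.dropWhile p) := by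
      rw [groupsB]
    by_cases hl : l = ""
    · -- blank run
      have hall : ∀ x ∈ l :: ls.takeWhile p, x = "" := by
        intro x hx
        rcases List.mem_cons.mp hx with h | h
        · rw [h, hl]
        · have hpx := List.mem_takeWhile_imp h
          simp only [p, hl] at hpx
          simpa using hpx
      rw [hgroups, hsplit, FA_blank_run sep _ _ hall, ih, renderB]
      rw [List.headD_cons, if_neg (by simp [hl])]
    · -- non-blank run
      have hall : ∀ x ∈ l :: ls.takeWhile p, x ≠ "" := by
        intro x hx
        rcases List.mem_cons.mp hx with h | h
        · rw [h]; exact hl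
        · have hpx := List.mem_takeWhile_imp h
          simp only [p] at hpx
          simp only [decide_not] at hpx
          by_cases hx' : x = "" <;> simp [hx', hl] at hpx ⊢
      rw [hgroups, hsplit, FA_nonblank_run sep _ _ "" hall, String.empty_append]
      rcases hrest : ls.dropWhile p with _ | ⟨r, rs⟩
      · simp [FA, renderB, groupsB, hl, String.empty_append, String.append_empty]
      · have hr : r = "" := by
          have hhd := List.head?_dropWhile_not p ls
          rw [hrest] at hhd
          simp only [List.head?_cons] at hhd
          simp only [p, decide_not] at hhd
          by_cases hx : r = ""
          · exact hx
          · simp [hx, hl] at hhd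
        subst hr
        rw [hrest] at ih
        rw [FA_flush sep _ (joinG_ne_empty _ _) rs, ih, renderB]
        rw [List.headD_cons, if_pos hl]
        have hne : (groupsB (("" : String) :: rs)).isEmpty = false := by
          rw [groupsB]; rfl
        rw [hne]
        simp [String.append_assoc]

-- ===== VERDICT (by name: the statement is the Claim_ definition above) =====
theorem connect_lines_spec : Claim_equal_connect_lines := by
  intro txt line_sep _
  unfold Spec_connect_lines connect_lines connect_lines_alt
  show (List.foldl (fun st y => stepA' line_sep st (PySem.Str.strip y)) ("", "")
      ((PySem.Str.split? txt "\n").getD [])).1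
    ++ (List.foldl (fun st y => stepA' line_sep st (PySem.Str.strip y)) ("", "")
      ((PySem.Str.split? txt "\n").getD [])).2
    = renderB line_sep (groupsB (((PySem.Str.split? txt "\n").getD []).map PySem.Str.strip))
  rw [← List.foldl_map]
  exact FA_eq_render line_sep (((PySem.Str.split? txt "\n").getD []).map PySem.Str.strip)
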